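-- pv_equiv track=rewrite | github.com/derPLUNK/AdventOfCode | 2020/Day_9/code.py | is_sum_of_previous
-- ===== SOURCE A (Python) =====
-- def is_sum_of_previous(previous_numbers, number):
--     if previous_numbers:
--         for i in previous_numbers:
--             for x in previous_numbers:
--                 if i != x and i + x == number:
--                     return True
--     else:
--         return True
-- ===== SOURCE B (Python) =====
-- def is_sum_of_previous(previous_numbers, number):
--     if not previous_numbers:
--         return True
--     s = set(previous_numbers)
--     if any(number - v in s and number - v != v for v in s):
--         return True
-- ===== Notes on version B (the rewrite author's own statement) =====
-- stated objective: faster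
-- what changed: Replaced the quadratic nested scan over all ordered pairs by a single pass over the deduplicated hash set checking whether number - v is a distinct member.
import Mathlib
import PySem

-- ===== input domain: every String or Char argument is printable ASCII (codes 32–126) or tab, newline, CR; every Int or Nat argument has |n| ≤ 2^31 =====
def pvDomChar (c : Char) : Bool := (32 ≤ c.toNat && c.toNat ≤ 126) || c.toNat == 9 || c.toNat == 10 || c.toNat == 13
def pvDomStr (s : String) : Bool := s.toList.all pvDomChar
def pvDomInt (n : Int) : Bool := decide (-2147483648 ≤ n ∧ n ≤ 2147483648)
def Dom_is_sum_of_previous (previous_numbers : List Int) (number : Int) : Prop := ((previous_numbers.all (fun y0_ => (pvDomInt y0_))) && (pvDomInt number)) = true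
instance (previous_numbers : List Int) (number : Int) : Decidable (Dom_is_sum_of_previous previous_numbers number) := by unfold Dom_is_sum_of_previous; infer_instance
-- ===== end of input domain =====

-- B replaces A's quadratic nested pair scan by one pass over set(previous_numbers)
-- looking up number - v; objective: faster (asymptotic).


-- ===== PORT A =====
-- inner 'for x in previous_numbers' with early 'return True'
def pvAInner (xs : List Int) (i number : Int) : Option Bool :=
  match xs with
  | [] => none
  | x :: rest => if i ≠ x ∧ i + x = number then some true else pvAInner rest i number

-- outer 'for i in previous_numbers'
def pvAOuter (is_ ps : List Int) (number : Int) : Option Bool :=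
  match is_ with
  | [] => none
  | i :: rest =>
    match pvAInner ps i number with
    | some b => some b
    | none => pvAOuter rest ps number

def is_sum_of_previous (previous_numbers : List Int) (number : Int) : Option Bool :=
  if previous_numbers ≠ [] then pvAOuter previous_numbers previous_numbers number
  else some true

-- ===== PORT B =====
-- 'any(number - v in s and number - v != v for v in s)' with early 'return True'
def pvBLoop (vs : List Int) (s : PySem.Set Int) (number : Int) : Option Bool :=
  match vs with
  | [] => none
  | v :: rest =>
    if (number - v) ∈ s ∧ number - v ≠ v then some true else pvBLoop rest s number

def is_sum_of_previous_alt (previous_numbers : List Int) (number : Int) : Option Bool :=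
  if previous_numbers = [] then some true
  else
    let s := PySem.Set.ofList previous_numbers
    pvBLoop s s number

-- ===== PRECONDITION & SPEC =====
def Spec_is_sum_of_previous (previous_numbers : List Int) (number : Int) (out : Option Bool) : Prop := out = is_sum_of_previous_alt previous_numbers number
instance (previous_numbers : List Int) (number : Int) (out : Option Bool) : Decidable (Spec_is_sum_of_previous previous_numbers number out) := by unfold Spec_is_sum_of_previous; infer_instance

-- ===== CLAIM (what is proved, stated in full; the proofs are below) =====
def Claim_equal_is_sum_of_previous : Prop := ∀ (previous_numbers : List Int) (number : Int), Dom_is_sum_of_previous previous_numbers number → Spec_is_sum_of_previous previous_numbers number (is_sum_of_previous previous_numbers number)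

-- ===== LEMMAS AND PROOFS =====

theorem pvAInner_eq (xs : List Int) (i number : Int) :
    pvAInner xs i number = if ∃ x ∈ xs, i ≠ x ∧ i + x = number then some true else none := by
  induction xs with
  | nil => simp [pvAInner]
  | cons x rest ih =>
    rw [pvAInner, ih]
    by_cases h : i ≠ x ∧ i + x = number
    · rw [if_pos h, if_pos ⟨x, List.mem_cons_self, h⟩]
    · rw [if_neg h]
      refine (if_congr ?_ rfl rfl)
      constructor
      · rintro ⟨y, hy, hh⟩; exact ⟨y, List.mem_cons_of_mem _ hy, hh⟩
      · rintro ⟨y, hy, hh⟩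
        rcases List.mem_cons.mp hy with rfl | hy
        · exact absurd hh h
        · exact ⟨y, hy, hh⟩

theorem pvAOuter_eq (is_ ps : List Int) (number : Int) :
    pvAOuter is_ ps number =
      if ∃ i ∈ is_, ∃ x ∈ ps, i ≠ x ∧ i + x = number then some true else none := by
  induction is_ with
  | nil => simp [pvAOuter]
  | cons i rest ih =>
    by_cases h : ∃ x ∈ ps, i ≠ x ∧ i + x = number
    · have h1 : pvAInner ps i number = some true := by rw [pvAInner_eq, if_pos h]
      show (match pvAInner ps i number with
            | some b => some b
            | none => pvAOuter rest ps number) = _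
      rw [h1, if_pos ⟨i, List.mem_cons_self, h⟩]
    · have h1 : pvAInner ps i number = none := by rw [pvAInner_eq, if_neg h]
      show (match pvAInner ps i number with
            | some b => some b
            | none => pvAOuter rest ps number) = _
      rw [h1, ih]
      refine (if_congr ?_ rfl rfl)
      constructor
      · rintro ⟨j, hj, hh⟩; exact ⟨j, List.mem_cons_of_mem _ hj, hh⟩
      · rintro ⟨j, hj, hh⟩
        rcases List.mem_cons.mp hj with rfl | hj
        · exact absurd hh h
        · exact ⟨j, hj, hh⟩

theorem pvBLoop_eq (vs : List Int) (s : PySem.Set Int) (number : Int) :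
    pvBLoop vs s number =
      if ∃ v ∈ vs, (number - v) ∈ s ∧ number - v ≠ v then some true else none := by
  induction vs with
  | nil => simp [pvBLoop]
  | cons v rest ih =>
    rw [pvBLoop, ih]
    by_cases h : (number - v) ∈ s ∧ number - v ≠ v
    · rw [if_pos h, if_pos ⟨v, List.mem_cons_self, h⟩]
    · rw [if_neg h]
      refine (if_congr ?_ rfl rfl)
      constructor
      · rintro ⟨w, hw, hh⟩; exact ⟨w, List.mem_cons_of_mem _ hw, hh⟩
      · rintro ⟨w, hw, hh⟩
        rcases List.mem_cons.mp hw with rfl | hw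
        · exact absurd hh h
        · exact ⟨w, hw, hh⟩

theorem pv_cond_iff (ps : List Int) (number : Int) :
    (∃ i ∈ ps, ∃ x ∈ ps, i ≠ x ∧ i + x = number) ↔
    (∃ v ∈ ps, (number - v) ∈ ps ∧ number - v ≠ v) := by
  constructor
  · rintro ⟨i, hi, x, hx, hne, hsum⟩
    refine ⟨i, hi, ?_, by omega⟩
    have : number - i = x := by omega
    rw [this]; exact hx
  · rintro ⟨v, hv, hm, hne⟩
    exact ⟨v, hv, number - v, hm, fun h => hne h.symm, by omega⟩

-- ===== VERDICT (by name: the statement is the Claim_ definition above) =====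
theorem is_sum_of_previous_spec : Claim_equal_is_sum_of_previous := by
  intro ps number _
  show is_sum_of_previous ps number = is_sum_of_previous_alt ps number
  unfold is_sum_of_previous is_sum_of_previous_alt
  by_cases hps : ps = []
  · simp [hps]
  · rw [if_pos hps, if_neg hps]
    show pvAOuter ps ps number
        = pvBLoop (PySem.Set.ofList ps) (PySem.Set.ofList ps) number
    rw [pvAOuter_eq, pvBLoop_eq]
    refine if_congr ?_ rfl rfl
    rw [pv_cond_iff]
    constructor
    · rintro ⟨v, hv, hm, hne⟩
      exact ⟨v, (PySem.Set.mem_ofList ps v).mpr hv, (PySem.Set.mem_ofList ps _).mpr hm, hne⟩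
    · rintro ⟨v, hv, hm, hne⟩
      exact ⟨v, (PySem.Set.mem_ofList ps v).mp hv, (PySem.Set.mem_ofList ps _).mp hm, hne⟩
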